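-- pv_equiv track=rewrite | github.com/johndoknjas/preflop-odds | compare.py | add_spacing
-- ===== SOURCE A (Python) =====
-- def add_spacing(cards: str) -> str:
--     """A function useful for debugging. Takes in a string (such as the `cards` param of
--        `is_first_hand_better`), and then adds spaces between each card (two chars), and puts each
--        hand (and the community cards) on separate lines."""
--     groups = cards.split()
--     for x, group in enumerate(groups):
--         new_str = ''
--         for i in range(len(group)):
--             new_str += group[i]
--             if i % 2 != 0:
--                 new_str += ' '
--         groups[x] = new_str
--     return '\n'.join(groups)
-- ===== SOURCE B (Python) =====
-- def add_spacing(cards: str) -> str: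
--     """Pair-chunking rewrite: slice each whitespace-separated group into 2-char
--        chunks and append a space after each complete chunk, instead of A's
--        char-by-char index-parity accumulator loop."""
--     out = []
--     for group in cards.split():
--         pairs = [group[i:i+2] for i in range(0, len(group), 2)]
--         out.append(''.join(p + ' ' if len(p) == 2 else p for p in pairs))
--     return '\n'.join(out)
-- ===== Notes on version B (the rewrite author's own statement) =====
-- stated objective: simpler
-- what changed: Replaces the per-character loop with an index-parity test and string accumulator by a recursive pair-chunking of each group (peel two chars and append a space), keeping the split/join shell.
import Mathlib
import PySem

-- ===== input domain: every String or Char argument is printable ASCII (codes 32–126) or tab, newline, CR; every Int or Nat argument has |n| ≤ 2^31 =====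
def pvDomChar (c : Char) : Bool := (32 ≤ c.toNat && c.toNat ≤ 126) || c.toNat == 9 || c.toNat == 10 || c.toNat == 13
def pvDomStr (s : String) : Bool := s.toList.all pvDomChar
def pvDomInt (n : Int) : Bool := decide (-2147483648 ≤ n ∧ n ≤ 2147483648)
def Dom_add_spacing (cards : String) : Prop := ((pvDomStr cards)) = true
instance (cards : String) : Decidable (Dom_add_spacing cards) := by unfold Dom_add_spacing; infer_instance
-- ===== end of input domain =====

-- B replaces A's per-character index-parity accumulator loop by slicing each group into 2-char chunks (space after each complete chunk); same cost, simpler decomposition.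


-- ===== PORT A =====
-- A's inner loop: for i in range(len(group)): new_str += group[i]; if i % 2 != 0: new_str += ' '
def pvA_group (g : List Char) : List Char :=
  (PySem.List.pyRange 0 (PySem.List.len g) 1).foldl
    (fun new_str i =>
      let new_str := new_str ++ [PySem.List.pyGetD g i ' ']
      if PySem.Int.mod i 2 ≠ 0 then new_str ++ [' '] else new_str) []

def add_spacing (cards : String) : String :=
  PySem.Str.join "\n" ((PySem.Str.split₀ cards).map (fun g => String.ofList (pvA_group g.toList)))

-- ===== PORT B =====
-- B's inner body: pairs = [group[i:i+2] for i in range(0, len(group), 2)];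
--                 ''.join(p + ' ' if len(p) == 2 else p for p in pairs)
def pvB_group (g : List Char) : List Char :=
  let pairs := (PySem.List.pyRange 0 (PySem.List.len g) 2).map
    (fun i => PySem.List.slice g (some i) (some (i + 2)))
  PySem.Chars.join [] (pairs.map (fun p => if p.length = 2 then p ++ [' '] else p))

def add_spacing_alt (cards : String) : String :=
  PySem.Str.join "\n" ((PySem.Str.split₀ cards).map (fun g => String.ofList (pvB_group g.toList)))

-- ===== PRECONDITION & SPEC =====
def Spec_add_spacing (cards : String) (out : String) : Prop := out = add_spacing_alt cards
instance (cards : String) (out : String) : Decidable (Spec_add_spacing cards out) := by unfold Spec_add_spacing; infer_instance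

-- ===== CLAIM (what is proved, stated in full; the proofs are below) =====
def Claim_equal_add_spacing : Prop := ∀ (cards : String), Dom_add_spacing cards → Spec_add_spacing cards (add_spacing cards)

-- ===== LEMMAS AND PROOFS =====

-- Common reference form: both per-group transforms equal this structural pair recursion.
def pvPairs : List Char → List Char
  | [] => []
  | [a] => [a]
  | a :: b :: rest => a :: b :: ' ' :: pvPairs rest

-- A's parity loop, over enumerate, equals the pair recursion (invariant: start index is even).
lemma pv_key (g : List Char) (acc : List Char) (s : Int) (hs : PySem.Int.mod s 2 = 0) :
    (PySem.List.enumerate g s).foldl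
      (fun new_str p =>
        let new_str := new_str ++ [p.2]
        if PySem.Int.mod p.1 2 ≠ 0 then new_str ++ [' '] else new_str) acc
    = acc ++ pvPairs g := by
  induction g using pvPairs.induct generalizing acc s with
  | case1 => simp [PySem.List.enumerate, pvPairs]
  | case2 a =>
      have hd : (2:Int) ∣ s := (PySem.Int.mod_eq_zero_iff_dvd s 2).mp hs
      simp [PySem.List.enumerate_cons, PySem.List.enumerate_nil, pvPairs, hd]
  | case3 a b rest ih =>
      have hs' : s % 2 = 0 := by
        rw [← PySem.Int.mod_eq_emod_of_pos (by norm_num : (0:Int) < 2)]; exact hs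
      have hodd : (s + 1) % 2 = 1 := by omega
      have hnext : PySem.Int.mod (s + 1 + 1) 2 = 0 := by
        rw [PySem.Int.mod_eq_emod_of_pos (by norm_num : (0:Int) < 2)]; omega
      have hd : (2:Int) ∣ s := (PySem.Int.mod_eq_zero_iff_dvd s 2).mp hs
      simp only [PySem.List.enumerate_cons, List.foldl_cons]
      rw [ih _ _ hnext]
      simp [pvPairs, hd, hodd]

lemma pv_groupA_eq (g : List Char) : pvA_group g = pvPairs g := by
  unfold pvA_group
  rw [show PySem.List.pyRange 0 (PySem.List.len g) 1
        = (PySem.List.enumerate g 0).map Prod.fst from by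
      rw [PySem.List.enumerate_eq_map_pyRange g ' ']
      simp [Function.comp_def]]
  rw [List.foldl_map]
  have := pv_key g [] 0 (by decide)
  simp only [List.nil_append] at this
  rw [← this]
  apply PySem.List.foldl_congr_mem
  intro acc p hp
  rw [PySem.List.mem_enumerate_iff] at hp
  obtain ⟨k, hk, rfl⟩ := hp
  simp [List.getElem?_eq_getElem hk]

-- ''.join with empty separator is flatten.
lemma pv_join_nil_flatten (ps : List (List Char)) : PySem.Chars.join [] ps = ps.flatten := by
  induction ps with
  | nil => simp [PySem.Chars.join_nil]
  | cons p rest ih =>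
      cases rest with
      | nil => simp [PySem.Chars.join_singleton]
      | cons q rest' =>
          rw [PySem.Chars.join_cons_cons]
          simp [ih]

-- B's chunking, in Nat form, equals the pair recursion.
lemma pv_chunks (g : List Char) :
    ((List.range ((g.length + 1) / 2)).map
      (fun k =>
        let p := (g.drop (2 * k)).take 2
        if p.length = 2 then p ++ [' '] else p)).flatten = pvPairs g := by
  induction g using pvPairs.induct with
  | case1 => simp [pvPairs]
  | case2 a => simp [pvPairs]
  | case3 a b rest ih =>
      have hcount : ((a :: b :: rest).length + 1) / 2 = (rest.length + 1) / 2 + 1 := by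
        simp [List.length_cons]; omega
      rw [hcount, List.range_succ_eq_map, List.map_cons, List.map_map, List.flatten_cons]
      have hdrop : ∀ k : Nat, (a :: b :: rest).drop (2 * Nat.succ k) = rest.drop (2 * k) := by
        intro k
        have h2 : 2 * Nat.succ k = 2 * k + 1 + 1 := by omega
        rw [h2, List.drop_succ_cons, List.drop_succ_cons]
      have hmap : (List.range ((rest.length + 1) / 2)).map
            ((fun k =>
              let p := ((a :: b :: rest).drop (2 * k)).take 2
              if p.length = 2 then p ++ [' '] else p) ∘ Nat.succ)
          = (List.range ((rest.length + 1) / 2)).map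
            (fun k =>
              let p := (rest.drop (2 * k)).take 2
              if p.length = 2 then p ++ [' '] else p) := by
        apply List.map_congr_left
        intro k _
        simp only [Function.comp_apply, hdrop]
      rw [hmap, ih]
      simp [pvPairs]

lemma pv_groupB_eq (g : List Char) : pvB_group g = pvPairs g := by
  unfold pvB_group
  rw [PySem.List.pyRange_of_pos 0 (PySem.List.len g) (by norm_num : (0:Int) < 2)]
  dsimp only
  rw [List.map_map, pv_join_nil_flatten]
  rw [← pv_chunks g]
  congr 1
  have hlen : PySem.List.len g = (g.length : Int) := by simp [PySem.List.len_eq]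
  have hcount : (if (0:Int) < PySem.List.len g
      then ((PySem.List.len g - 0 + 2 - 1) / 2).toNat else 0) = (g.length + 1) / 2 := by
    rw [hlen]; split_ifs with h <;> omega
  rw [hcount, List.map_map]
  apply List.map_congr_left
  intro k _
  have hcast : (0:Int) + 2 * (k:Int) = ((2 * k : Nat) : Int) := by push_cast; ring
  have hcast2 : ((2 * k : Nat) : Int) + 2 = ((2 * k + 2 : Nat) : Int) := by push_cast; ring
  simp only [Function.comp_apply, hcast, hcast2, PySem.List.slice_natCast]
  have h22 : 2 * k + 2 - 2 * k = 2 := by omega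
  rw [h22]

-- ===== VERDICT (by name: the statement is the Claim_ definition above) =====
theorem add_spacing_spec : Claim_equal_add_spacing := by
  intro cards _
  unfold Spec_add_spacing add_spacing add_spacing_alt
  simp [pv_groupA_eq, pv_groupB_eq]
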